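-- pv_equiv track=rewrite | github.com/silvafj/BBK-MSCCS-2017-19 | POP1/mocks/practical-three/question6.py | bulls
-- ===== SOURCE A (Python) =====
-- def bulls(n1, n2):
--     s1 = str(n1)
--     s2 = list(str(n2))
--     correct = 0
--     for i in range(len(s1)):
--         if s1[i] in s2:
--             correct += 1
--
--     return correct
-- ===== SOURCE B (Python) =====
-- def bulls(n1, n2):
--     s1 = str(n1)
--     return sum(s1.count(d) for d in set(str(n2)))
-- ===== Notes on version B (the rewrite author's own statement) =====
-- stated objective: alternative
-- what changed: B loops over the distinct characters of str(n2) and sums str(n1).count(d) for each, instead of A's loop over str(n1)'s positions with a membership test against str(n2).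
import Mathlib
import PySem

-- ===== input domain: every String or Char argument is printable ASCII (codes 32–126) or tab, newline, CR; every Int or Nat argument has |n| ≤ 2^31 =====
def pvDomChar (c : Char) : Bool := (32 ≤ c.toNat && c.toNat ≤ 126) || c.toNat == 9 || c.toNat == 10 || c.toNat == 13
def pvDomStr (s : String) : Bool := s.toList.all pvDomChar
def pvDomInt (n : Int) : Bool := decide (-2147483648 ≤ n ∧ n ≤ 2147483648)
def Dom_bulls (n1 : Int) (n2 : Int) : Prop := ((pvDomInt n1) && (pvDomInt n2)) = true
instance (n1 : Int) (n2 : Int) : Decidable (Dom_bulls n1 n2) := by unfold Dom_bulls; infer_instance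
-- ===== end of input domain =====

-- B loops over the distinct characters of str(n2), summing str(n1).count(d), instead of A's
-- positional loop over str(n1) with a membership test; an alternative decomposition, same result.


-- ===== PORT A =====
def bulls (n1 : Int) (n2 : Int) : Int :=
  let s1 := (PySem.Int.toStr n1).toList
  let s2 := (PySem.Int.toStr n2).toList
  (PySem.List.pyRange 0 (PySem.List.len s1) 1).foldl
    (fun correct i => if PySem.List.pyGetD s1 i ' ' ∈ s2 then correct + 1 else correct) 0

-- ===== PORT B =====
def bulls_alt (n1 : Int) (n2 : Int) : Int :=
  let s1 := (PySem.Int.toStr n1).toList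
  let ds := PySem.Set.ofList (PySem.Int.toStr n2).toList
  ds.foldl (fun acc d => acc + (PySem.List.count s1 d : Int)) 0

-- ===== PRECONDITION & SPEC =====
def Spec_bulls (n1 : Int) (n2 : Int) (out : Int) : Prop := out = bulls_alt n1 n2
instance (n1 : Int) (n2 : Int) (out : Int) : Decidable (Spec_bulls n1 n2 out) := by unfold Spec_bulls; infer_instance

-- ===== CLAIM (what is proved, stated in full; the proofs are below) =====
def Claim_equal_bulls : Prop := ∀ (n1 : Int) (n2 : Int), Dom_bulls n1 n2 → Spec_bulls n1 n2 (bulls n1 n2)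

-- ===== LEMMAS AND PROOFS =====

-- Summing the 0/1 indicator of d = c over a duplicate-free D is the membership indicator of c.
theorem pv_ind_sum (c : Char) (D : List Char) (hD : D.Nodup) :
    (D.map (fun d => if d = c then (1 : Int) else 0)).sum = if c ∈ D then 1 else 0 := by
  induction D with
  | nil => simp
  | cons e D ihD =>
    have hnd : D.Nodup := hD.of_cons
    by_cases he : e = c
    · subst he
      have hc : e ∉ D := (List.nodup_cons.mp hD).1
      simp [ihD hnd, hc]
    · rw [List.map_cons, List.sum_cons, ihD hnd]
      simp only [List.mem_cons]
      split_ifs <;> simp_all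

-- On a duplicate-free D, summing per-element counts over D equals counting members of D in s1.
theorem pv_sum_counts (s1 D : List Char) (hD : D.Nodup) :
    (D.map (fun d => (s1.count d : Int))).sum = (s1.countP (fun c => decide (c ∈ D)) : Int) := by
  induction s1 with
  | nil => simp
  | cons c s1 ih =>
    have hcount : ∀ d : Char, ((c :: s1).count d : Int)
        = (s1.count d : Int) + (if d = c then (1 : Int) else 0) := by
      intro d
      by_cases h : d = c
      · subst h; simp
      · simp [List.count_cons, h]
        exact fun hh => h hh.symm
    have hsplit : (D.map (fun d => ((c :: s1).count d : Int))).sum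
        = (D.map (fun d => (s1.count d : Int))).sum
          + (D.map (fun d => if d = c then (1 : Int) else 0)).sum := by
      rw [← PySem.List.sum_map_add_int]
      exact congrArg List.sum (List.map_congr_left (fun d _ => hcount d))
    rw [hsplit, pv_ind_sum c D hD, ih]
    by_cases hm : c ∈ D <;> simp [hm]

-- ===== VERDICT (by name: the statement is the Claim_ definition above) =====
theorem bulls_spec : Claim_equal_bulls := by
  intro n1 n2 _
  unfold Spec_bulls bulls bulls_alt
  simp only []
  set s1 := (PySem.Int.toStr n1).toList with hs1
  set s2 := (PySem.Int.toStr n2).toList with hs2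
  rw [PySem.List.foldl_pyRange_zero_pyGetD s1 ' '
        (f := fun acc c => if c ∈ s2 then acc + 1 else acc) (init := 0),
      PySem.List.foldl_ite_add_one, PySem.List.foldl_add, zero_add, zero_add]
  simp only [PySem.List.count_eq]
  rw [pv_sum_counts s1 (PySem.Set.ofList s2) (PySem.Set.nodup_ofList s2)]
  congr 1
  exact List.countP_congr (fun c _ => by simp)
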